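-- pv_equiv track=rewrite | github.com/BychkovArthur/minimal-DNF | first_window.py | tuple_to_string
-- ===== SOURCE A (Python) =====
-- def negation_change(var):
--     """Changing how the variable we use with negation looks like
--
--     !<var> -> <var>̅
--     """
--     if var[1] == 'X':
--         return 'X̅'
--     if var[1] == 'Y':
--         return 'Y̅'
--     if var[1] == 'Z':
--         return 'Z̅'
--
-- def tuple_to_string(tup):
--     """Converting nested tuples representing conjunctors to a string"""
--     str = '\n'
--     if len(tup) == 1:
--         for conjuctor in tup[0]:
--             for var in conjuctor:
--                 if len(var) == 2:
--                     str += negation_change(var)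
--                 else:
--                     str += var
--             if conjuctor != tup[0][-1]:
--                 str += '  V  '
--     else:
--         for mdnf in tup:
--             for conjuctor in mdnf:
--                 for var in conjuctor:
--                     if len(var) == 2:
--                         str += negation_change(var)
--                     else:
--                         str += var
--                 if conjuctor != mdnf[-1]:
--                     str += '  V  '
--             str += '\n'
--     return str
-- ===== SOURCE B (Python) =====
-- def negation_change(var):
--     """Changing how the variable we use with negation looks like
--
--     !<var> -> <var>̅
--     """
--     if var[1] == 'X':
--         return 'X̅'
--     if var[1] == 'Y':
--         return 'Y̅'
--     if var[1] == 'Z':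
--         return 'Z̅'
--
--
-- def tuple_to_string(tup):
--     """Converting nested tuples representing conjunctors to a string,
--     built by pure structural recursion (back-to-front concatenation)."""
--     def render_conj(c):
--         if not c:
--             return ''
--         v = c[0]
--         head = negation_change(v) if len(v) == 2 else v
--         return head + render_conj(c[1:])
--
--     def render_line(cs, last):
--         if not cs:
--             return ''
--         sep = '  V  ' if cs[0] != last else ''
--         return render_conj(cs[0]) + sep + render_line(cs[1:], last)
--
--     def render_all(ms):
--         if not ms:
--             return ''
--         m = ms[0]
--         line = render_line(m, m[-1]) if m else ''
--         return line + '\n' + render_all(ms[1:])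
--
--     if len(tup) == 1:
--         m = tup[0]
--         return '\n' + (render_line(m, m[-1]) if m else '')
--     return '\n' + render_all(tup)
-- ===== Notes on version B (the rewrite author's own statement) =====
-- stated objective: alternative
-- what changed: A's two duplicated three-level mutating-accumulator loops are replaced by pure structural recursion that renders each layer back-to-front (one recursive function per layer: conjunctor, line with the last conjunctor passed down once, whole tuple) and concatenates the results, with no mutable accumulator.
import Mathlib
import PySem

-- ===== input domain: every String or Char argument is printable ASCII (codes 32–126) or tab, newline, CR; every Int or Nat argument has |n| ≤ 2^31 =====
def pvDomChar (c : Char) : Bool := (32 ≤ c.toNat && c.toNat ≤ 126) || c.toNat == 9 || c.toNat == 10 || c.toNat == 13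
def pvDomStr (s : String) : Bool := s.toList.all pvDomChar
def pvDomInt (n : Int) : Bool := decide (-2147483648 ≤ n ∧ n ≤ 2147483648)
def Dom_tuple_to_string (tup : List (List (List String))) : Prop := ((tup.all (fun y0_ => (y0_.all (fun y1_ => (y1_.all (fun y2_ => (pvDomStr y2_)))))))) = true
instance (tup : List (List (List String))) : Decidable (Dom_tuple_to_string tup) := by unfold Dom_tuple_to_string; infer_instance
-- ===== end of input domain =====

-- B replaces A's duplicated mutating-accumulator loops by per-layer structural recursion building the string back-to-front (objective: alternative).

-- ===== PORT A =====
-- negation_change: falls through to an implicit None when var[1] is not X/Y/Z (Pre_ excludes callers hitting that).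
def negation_change (var : String) : Option String :=
  if PySem.Str.pyGet? var 1 = some 'X' then some "X̅"
  else if PySem.Str.pyGet? var 1 = some 'Y' then some "Y̅"
  else if PySem.Str.pyGet? var 1 = some 'Z' then some "Z̅"
  else none

-- literal transliteration of A: mutable string accumulator, duplicated nested loops in the two branches.
-- (.getD "" stands for the 'str += None' TypeError site; Pre_ excludes exactly those inputs.)
def tuple_to_string (tup : List (List (List String))) : String :=
  let s := "\n"
  if PySem.List.len tup == 1 then
    let m := PySem.List.pyGetD tup 0 []
    m.foldl (fun acc conjuctor =>
      let acc := conjuctor.foldl (fun acc var =>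
        if PySem.Str.len var == 2 then acc ++ (negation_change var).getD "" else acc ++ var) acc
      if conjuctor ≠ PySem.List.pyGetD m (-1) [] then acc ++ "  V  " else acc) s
  else
    tup.foldl (fun acc mdnf =>
      (mdnf.foldl (fun acc conjuctor =>
        let acc := conjuctor.foldl (fun acc var =>
          if PySem.Str.len var == 2 then acc ++ (negation_change var).getD "" else acc ++ var) acc
        if conjuctor ≠ PySem.List.pyGetD mdnf (-1) [] then acc ++ "  V  " else acc) acc) ++ "\n") s

-- ===== PORT B =====
-- (.getD "" again marks the '+ None' TypeError site, excluded by Pre_.)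
def render_conj : List String → String
  | [] => ""
  | v :: c =>
      (if PySem.Str.len v == 2 then (negation_change v).getD "" else v) ++ render_conj c

def render_line : List (List String) → List String → String
  | [], _ => ""
  | c :: cs, last =>
      render_conj c ++ (if c ≠ last then "  V  " else "") ++ render_line cs last

def render_all : List (List (List String)) → String
  | [] => ""
  | m :: ms =>
      (if m ≠ [] then render_line m (PySem.List.pyGetD m (-1) []) else "") ++ "\n" ++ render_all ms

def tuple_to_string_alt (tup : List (List (List String))) : String :=
  if PySem.List.len tup == 1 then
    let m := PySem.List.pyGetD tup 0 []
    "\n" ++ (if m ≠ [] then render_line m (PySem.List.pyGetD m (-1) []) else "")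
  else
    "\n" ++ render_all tup

-- ===== PRECONDITION & SPEC =====
-- Pre_ excludes inputs containing a length-2 variable whose second character is not X/Y/Z:
-- there Python's negation_change returns None and 'str += None' / '+ None' raises TypeError (no value is returned).
def Pre_tuple_to_string (tup : List (List (List String))) : Prop :=
  ∀ m ∈ tup, ∀ c ∈ m, ∀ v ∈ c, PySem.Str.len v = 2 →
    (PySem.Str.pyGet? v 1 = some 'X' ∨ PySem.Str.pyGet? v 1 = some 'Y' ∨ PySem.Str.pyGet? v 1 = some 'Z')
instance (tup : List (List (List String))) : Decidable (Pre_tuple_to_string tup) := by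
  unfold Pre_tuple_to_string; infer_instance

def pvWitness_tuple_to_string : List (List (List String)) := [[["X", "!Y"], ["Z"]]]

def Spec_tuple_to_string (tup : List (List (List String))) (out : String) : Prop := out = tuple_to_string_alt tup
instance (tup : List (List (List String))) (out : String) : Decidable (Spec_tuple_to_string tup out) := by unfold Spec_tuple_to_string; infer_instance

-- ===== CLAIM (what is proved, stated in full; the proofs are below) =====
def Claim_equal_tuple_to_string : Prop := ∀ (tup : List (List (List String))), Dom_tuple_to_string tup → Pre_tuple_to_string tup → Spec_tuple_to_string tup (tuple_to_string tup)

-- ===== LEMMAS AND PROOFS =====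

theorem fold_vars (c : List String) (a : String) :
    c.foldl (fun acc var =>
      if PySem.Str.len var == 2 then acc ++ (negation_change var).getD "" else acc ++ var) a
    = a ++ render_conj c := by
  induction c generalizing a with
  | nil => simp [render_conj]
  | cons v c ih =>
      simp only [List.foldl_cons, render_conj, ih]
      split <;> simp [String.append_assoc]

theorem fold_line (last : List String) (cs : List (List String)) (a : String) :
    cs.foldl (fun acc conjuctor =>
      let acc := conjuctor.foldl (fun acc var =>
        if PySem.Str.len var == 2 then acc ++ (negation_change var).getD "" else acc ++ var) acc
      if conjuctor ≠ last then acc ++ "  V  " else acc) a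
    = a ++ render_line cs last := by
  induction cs generalizing a with
  | nil => simp [render_line]
  | cons c cs ih =>
      rw [List.foldl_cons, ih]
      simp only [fold_vars, render_line]
      split <;> simp [String.append_assoc]

theorem line_empty_guard (m : List (List String)) (last : List String) :
    (if m ≠ [] then render_line m last else "") = render_line m last := by
  cases m <;> simp [render_line]

theorem fold_outer (tup : List (List (List String))) (a : String) :
    tup.foldl (fun acc mdnf =>
      (mdnf.foldl (fun acc conjuctor =>
        let acc := conjuctor.foldl (fun acc var =>
          if PySem.Str.len var == 2 then acc ++ (negation_change var).getD "" else acc ++ var) acc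
        if conjuctor ≠ PySem.List.pyGetD mdnf (-1) [] then acc ++ "  V  " else acc) acc) ++ "\n") a
    = a ++ render_all tup := by
  induction tup generalizing a with
  | nil => simp [render_all]
  | cons m tup ih =>
      rw [List.foldl_cons, ih, fold_line, render_all, line_empty_guard]
      simp [String.append_assoc]

-- ===== VERDICT (by name: the statement is the Claim_ definition above) =====
theorem tuple_to_string_spec : Claim_equal_tuple_to_string := by
  intro tup _ _
  unfold Spec_tuple_to_string tuple_to_string tuple_to_string_alt
  split
  · simp only [fold_line, line_empty_guard]
  · rw [fold_outer]
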